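-- pv_equiv track=rewrite | github.com/kuznetsovvj/education | algorithms/codeforces/1359b.py | check
-- ===== SOURCE A (Python) =====
-- def check(x, y, line):
--     res = 0
--     if 2*x <= y:
--         for i in line:
--             if i == '.':
--                 res += x
--     else:
--         s = 0
--         for i in line:
--             if i == '.':
--                 s += 1
--                 if s == 2:
--                     res += y
--                     s = 0
--             else:
--                 if s == 1:
--                     res += x
--                     s = 0
--         if s == 1:
--             res += x
--     return res
-- ===== SOURCE B (Python) =====
-- def check(x, y, line):
--     # cost for covering a pair of adjacent empty cells
--     pair = min(y, 2 * x)
--     res = 0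
--     i = 0
--     n = len(line)
--     while i < n:
--         if line[i] == '.':
--             j = i
--             while j < n and line[j] == '.':
--                 j += 1
--             L = j - i
--             res += (L // 2) * pair + (L % 2) * x
--             i = j
--         else:
--             i += 1
--     return res
-- ===== Notes on version B (the rewrite author's own statement) =====
-- stated objective: simpler
-- what changed: B scans maximal runs of '.' and adds the closed form (L//2)*min(y,2*x)+(L%2)*x per run, replacing A's global 2*x<=y branch and its stateful pair-counting loop.
import Mathlib
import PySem

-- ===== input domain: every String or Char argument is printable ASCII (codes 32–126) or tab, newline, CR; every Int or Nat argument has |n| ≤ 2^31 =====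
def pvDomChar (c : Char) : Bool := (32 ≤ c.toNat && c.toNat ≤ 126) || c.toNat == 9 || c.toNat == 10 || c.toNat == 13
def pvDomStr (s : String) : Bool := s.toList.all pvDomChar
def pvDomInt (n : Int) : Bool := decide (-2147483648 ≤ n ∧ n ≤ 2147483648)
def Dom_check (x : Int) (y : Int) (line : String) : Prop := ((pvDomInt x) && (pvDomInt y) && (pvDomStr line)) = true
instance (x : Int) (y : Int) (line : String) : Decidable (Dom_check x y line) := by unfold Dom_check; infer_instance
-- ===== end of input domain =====

-- B replaces A's global 2*x<=y branch and stateful pair-counting loop by one closed formula per maximal run of '.'; objective: simpler.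

-- ===== PORT A =====
-- the loop body of A's else-branch: state (res, s)
def checkStep (x : Int) (y : Int) (p : Int × Int) (i : Char) : Int × Int :=
  if i = '.' then
    (if p.2 + 1 = 2 then (p.1 + y, 0) else (p.1, p.2 + 1))
  else
    (if p.2 = 1 then (p.1 + x, 0) else p)

def check (x : Int) (y : Int) (line : String) : Int :=
  if 2 * x ≤ y then
    line.toList.foldl (fun res i => if i = '.' then res + x else res) 0
  else
    let p := line.toList.foldl (checkStep x y) (0, 0)
    if p.2 = 1 then p.1 + x else p.1

-- ===== PORT B =====
-- B's outer while-loop: each step consumes one wall char or one whole run of '.'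
-- (L // 2 and L % 2 are exact: PySem floordiv/mod on the nonnegative run length)
def checkRuns (x : Int) (pair : Int) : List Char → Int
  | [] => 0
  | c :: rest =>
    if c = '.' then
      let L : Int := ((1 + (rest.takeWhile (· = '.')).length : Nat) : Int)
      PySem.Int.floordiv L 2 * pair + PySem.Int.mod L 2 * x
        + checkRuns x pair (rest.dropWhile (· = '.'))
    else
      checkRuns x pair rest
termination_by l => l.length
decreasing_by
  · exact Nat.lt_succ_of_le (List.length_dropWhile_le _ _)
  · simp

def check_alt (x : Int) (y : Int) (line : String) : Int :=
  checkRuns x (min y (2 * x)) line.toList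

-- ===== PRECONDITION & SPEC =====
def Spec_check (x : Int) (y : Int) (line : String) (out : Int) : Prop := out = check_alt x y line
instance (x : Int) (y : Int) (line : String) (out : Int) : Decidable (Spec_check x y line out) := by unfold Spec_check; infer_instance

-- ===== CLAIM (what is proved, stated in full; the proofs are below) =====
def Claim_equal_check : Prop := ∀ (x : Int) (y : Int) (line : String), Dom_check x y line → Spec_check x y line (check x y line)

-- ===== LEMMAS AND PROOFS =====

theorem checkRuns_cons (x pair : Int) (c : Char) (rest : List Char) :
    checkRuns x pair (c :: rest)
      = if c = '.' then
          PySem.Int.floordiv ((1 + (rest.takeWhile (· = '.')).length : Nat) : Int) 2 * pair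
            + PySem.Int.mod ((1 + (rest.takeWhile (· = '.')).length : Nat) : Int) 2 * x
            + checkRuns x pair (rest.dropWhile (· = '.'))
        else checkRuns x pair rest := by
  rw [checkRuns]

-- A's first branch counts '.' times x
theorem foldl_count (x : Int) (l : List Char) (r : Int) :
    l.foldl (fun res i => if i = '.' then res + x else res) r
      = r + (l.count '.') * x := by
  induction l generalizing r with
  | nil => simp
  | cons c rest ih =>
    by_cases h : c = '.'
    · subst h; simp [List.count_cons, ih]; ring
    · simp [h, ih]

-- run decomposition of a list starting with '.'
theorem run_decomp (rest : List Char) :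
    ('.' : Char) :: rest
      = List.replicate (1 + (rest.takeWhile (· = '.')).length) '.'
          ++ rest.dropWhile (· = '.') := by
  have ht : rest.takeWhile (· = '.') = List.replicate (rest.takeWhile (· = '.')).length '.' := by
    apply List.eq_replicate_of_mem
    intro a ha
    have := List.mem_takeWhile_imp ha
    simpa using this
  calc ('.' : Char) :: rest
      = '.' :: (rest.takeWhile (· = '.') ++ rest.dropWhile (· = '.')) := by
        rw [List.takeWhile_append_dropWhile]
    _ = _ := by
        rw [List.replicate_add]
        simp [ht.symm]

theorem head_dropWhile_ne (rest : List Char) (d : Char) (t : List Char)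
    (h : rest.dropWhile (· = '.') = d :: t) : d ≠ '.' := by
  have := List.head_dropWhile_not (p := (· = '.')) (l := rest) (by simp [h])
  simp only [h] at this
  simpa using this

-- A's else-branch fold over a block of k dots from state (r,0)
theorem foldl_step_replicate (x y r : Int) (k : Nat) :
    (List.replicate k '.').foldl (checkStep x y) (r, 0)
      = (r + ((k / 2 : Nat) : Int) * y, ((k % 2 : Nat) : Int)) := by
  induction k generalizing r with
  | zero => simp
  | succ k ih =>
    rw [List.replicate_succ', List.foldl_append, ih]
    have hstep : checkStep x y (r + ((k / 2 : Nat) : Int) * y, ((k % 2 : Nat) : Int)) '.'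
        = (r + (((k + 1) / 2 : Nat) : Int) * y, (((k + 1) % 2 : Nat) : Int)) := by
      rcases Nat.mod_two_eq_zero_or_one k with h2 | h2
      · have ha : (k + 1) / 2 = k / 2 := by omega
        have hb : (k + 1) % 2 = 1 := by omega
        simp only [checkStep, h2, ha, hb]
        norm_num
      · have ha : (k + 1) / 2 = k / 2 + 1 := by omega
        have hb : (k + 1) % 2 = 0 := by omega
        simp only [checkStep, h2, ha, hb]
        norm_num
        ring
    rw [List.foldl_cons, hstep, List.foldl_nil]

-- main invariant for the else branch: flushing A's fold equals B's run recursion with pair = y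
theorem foldl_step_eq_runs (x y : Int) (l : List Char) (r : Int) :
    (let p := l.foldl (checkStep x y) (r, 0)
     if p.2 = 1 then p.1 + x else p.1)
      = r + checkRuns x y l := by
  induction hn : l.length using Nat.strong_induction_on generalizing l r with
  | _ n ih =>
  match l with
  | [] => simp [checkRuns]
  | c :: rest =>
    by_cases hc : c = '.'
    · subst hc
      conv_lhs => rw [run_decomp rest]
      rw [List.foldl_append, foldl_step_replicate, checkRuns_cons]
      rw [if_pos rfl]
      set k := 1 + (rest.takeWhile (· = '.')).length with hk
      have hfl : PySem.Int.floordiv ((k : Nat) : Int) 2 = ((k / 2 : Nat) : Int) :=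
        PySem.Int.floordiv_natCast k 2
      have hmd : PySem.Int.mod ((k : Nat) : Int) 2 = ((k % 2 : Nat) : Int) :=
        PySem.Int.mod_natCast k 2
      rw [hfl, hmd]
      cases hd : rest.dropWhile (· = '.') with
      | nil =>
        rcases Nat.mod_two_eq_zero_or_one k with h2 | h2 <;>
          simp [checkRuns, h2] <;> ring
      | cons d t =>
        have hdne : d ≠ '.' := head_dropWhile_ne rest d t hd
        have hlen : t.length < n := by
          subst hn
          have h1 : (rest.dropWhile (· = '.')).length ≤ rest.length :=
            List.length_dropWhile_le _ _
          rw [hd] at h1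
          simp at h1 ⊢
          omega
        have hstep : checkStep x y (r + ((k / 2 : Nat) : Int) * y, ((k % 2 : Nat) : Int)) d
            = (r + ((k / 2 : Nat) : Int) * y + ((k % 2 : Nat) : Int) * x, 0) := by
          rcases Nat.mod_two_eq_zero_or_one k with h2 | h2 <;>
            simp [checkStep, hdne, h2]
        rw [List.foldl_cons, hstep, ih t.length hlen t _ rfl, checkRuns_cons]
        simp [hdne, add_assoc]
    · rw [checkRuns_cons]
      simp only [if_neg hc]
      have : checkStep x y (r, 0) c = (r, 0) := by simp [checkStep, hc]
      rw [List.foldl_cons, this]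
      exact ih rest.length (by subst hn; simp) rest r rfl

-- B's run recursion with pair = 2*x counts '.' times x
theorem runs_two_x (x : Int) (l : List Char) :
    checkRuns x (2 * x) l = (l.count '.') * x := by
  induction hn : l.length using Nat.strong_induction_on generalizing l with
  | _ n ih =>
  match l with
  | [] => simp [checkRuns]
  | c :: rest =>
    by_cases hc : c = '.'
    · subst hc
      rw [checkRuns_cons]
      rw [if_pos rfl]
      set k := 1 + (rest.takeWhile (· = '.')).length with hk
      have hfl : PySem.Int.floordiv ((k : Nat) : Int) 2 = ((k / 2 : Nat) : Int) :=
        PySem.Int.floordiv_natCast k 2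
      have hmd : PySem.Int.mod ((k : Nat) : Int) 2 = ((k % 2 : Nat) : Int) :=
        PySem.Int.mod_natCast k 2
      have hlen : (rest.dropWhile (· = '.')).length < n := by
        subst hn
        have := List.length_dropWhile_le (· = '.') rest
        simp; omega
      have hcount : (('.' : Char) :: rest).count '.' = k + (rest.dropWhile (· = '.')).count '.' := by
        conv_lhs => rw [run_decomp rest]
        rw [List.count_append, List.count_replicate]
        simp [hk]
      rw [ih _ hlen _ rfl, hcount, hfl, hmd]
      have hk2 : ((k / 2 : Nat) : Int) * 2 + ((k % 2 : Nat) : Int) = (k : Int) := by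
        have := Nat.div_add_mod k 2
        push_cast
        omega
      rw [Nat.cast_add]
      linear_combination x * hk2
    · rw [checkRuns_cons]
      simp only [if_neg hc]
      rw [ih rest.length (by subst hn; simp) rest rfl]
      simp [hc]

-- ===== VERDICT (by name: the statement is the Claim_ definition above) =====
theorem check_spec : Claim_equal_check := by
  intro x y line _
  unfold Spec_check check check_alt
  by_cases h : 2 * x ≤ y
  · have hmin : min y (2 * x) = 2 * x := min_eq_right h
    rw [if_pos h, hmin, foldl_count, runs_two_x]
    simp
  · have hmin : min y (2 * x) = y := min_eq_left (le_of_not_ge h)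
    rw [if_neg h, hmin]
    have := foldl_step_eq_runs x y line.toList 0
    simpa using this
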